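-- pv_equiv track=rewrite | github.com/itolstov09/codewars | Python/6 kyu/dubstep.py | song_decoder
-- ===== SOURCE A (Python) =====
-- def song_decoder(song_text):
--     decoded_song = ''
--
--     i = 0
--     song_length = len(song_text)
--     target_element = 'WUB'
--     target_element_length = len(target_element)
--     while i < song_length:
--         if song_text[i : i + target_element_length] == target_element:
--             i += target_element_length
--             while i < song_length - target_element_length:
--                 if song_text[i : i + target_element_length] == target_element:
--                     i += target_element_length
--                 else:
--                     break
--             decoded_song += ' '
--         else:
--             decoded_song += song_text[i]
--             i += 1
--
--
--     return decoded_song.strip().rstrip()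
-- ===== SOURCE B (Python) =====
-- def song_decoder(song_text):
--     return ' '.join(p for p in song_text.split('WUB') if p).strip()
-- ===== Notes on version B (the rewrite author's own statement) =====
-- stated objective: idiomatic
-- what changed: Replaces A's hand-written index/slice scan with nested while loops and character-by-character string concatenation by a single split-on-the-token / filter-out-empty-parts / join-with-space / strip expression.
import Mathlib
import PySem

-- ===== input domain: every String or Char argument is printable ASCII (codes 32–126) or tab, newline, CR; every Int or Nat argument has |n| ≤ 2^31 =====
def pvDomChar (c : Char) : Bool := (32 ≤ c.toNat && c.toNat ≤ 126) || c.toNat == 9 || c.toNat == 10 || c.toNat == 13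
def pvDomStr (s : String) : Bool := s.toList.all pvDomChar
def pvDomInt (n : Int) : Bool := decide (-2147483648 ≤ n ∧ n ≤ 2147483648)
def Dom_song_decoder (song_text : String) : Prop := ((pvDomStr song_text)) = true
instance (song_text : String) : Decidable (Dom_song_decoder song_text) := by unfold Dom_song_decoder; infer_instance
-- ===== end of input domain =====

-- B replaces A's hand-written index scan by split-on-'WUB' / filter-empties / join-with-space / strip (same result, more idiomatic).


-- ===== PORT A =====
-- the inner while loop: while i < n - 3 and song_text[i:i+3] == 'WUB': i += 3
-- (stated on the remaining suffix: at least 4 chars left and the next three are 'WUB')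
def pvInnerA : List Char → List Char
  | 'W' :: 'U' :: 'B' :: c :: r => pvInnerA (c :: r)
  | l => l

theorem pvInnerA_length_le (l : List Char) : (pvInnerA l).length ≤ l.length := by
  induction l using pvInnerA.induct with
  | case1 c r ih => simpa [pvInnerA] using Nat.le_trans ih (by simp)
  | case2 l h =>
    rw [pvInnerA.eq_def]
    split
    · exact absurd rfl (h _ _)
    · exact Nat.le_refl _

-- the outer while loop over i, on the remaining suffix song_text[i:]
def pvLoopA : List Char → List Char
  | 'W' :: 'U' :: 'B' :: r => ' ' :: pvLoopA (pvInnerA r)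
  | c :: r => c :: pvLoopA r
  | [] => []
termination_by l => l.length
decreasing_by
  · have := pvInnerA_length_le r; simp; omega
  · simp

def song_decoder (song_text : String) : String :=
  String.ofList (PySem.Chars.rstrip (PySem.Chars.strip (pvLoopA song_text.toList)))

-- ===== PORT B =====
-- ' '.join(p for p in song_text.split('WUB') if p).strip(), ported on code-point lists (PySem.Chars is exact there)
def song_decoder_alt (song_text : String) : String :=
  String.ofList (PySem.Chars.strip
    (PySem.Chars.join [' ']
      ((PySem.Chars.splitOn song_text.toList ['W', 'U', 'B']).filter (fun p => p ≠ []))))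

-- ===== PRECONDITION & SPEC =====
def Spec_song_decoder (song_text : String) (out : String) : Prop := out = song_decoder_alt song_text
instance (song_text : String) (out : String) : Decidable (Spec_song_decoder song_text out) := by unfold Spec_song_decoder; infer_instance

-- ===== CLAIM (what is proved, stated in full; the proofs are below) =====
def Claim_equal_song_decoder : Prop := ∀ (song_text : String), Dom_song_decoder song_text → Spec_song_decoder song_text (song_decoder song_text)

-- ===== LEMMAS AND PROOFS =====

def pvWub : List Char := ['W', 'U', 'B']

-- structural version of splitting on 'WUB' (proved equal to PySem.Chars.splitOn below)
def pvSp : List Char → List (List Char)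
  | [] => [[]]
  | c :: r =>
    if pvWub.isPrefixOf (c :: r) then [] :: pvSp ((c :: r).drop 3)
    else (pvSp r).modifyHead (c :: ·)
termination_by l => l.length
decreasing_by
  · simp only [List.length_drop, List.length_cons]; omega
  · simp

lemma pvWub_prefix_iff (l : List Char) :
    pvWub.isPrefixOf l = true ↔ ∃ t, l = 'W' :: 'U' :: 'B' :: t := by
  rcases l with _ | ⟨a, _ | ⟨b, _ | ⟨c, t⟩⟩⟩ <;> simp [pvWub, List.isPrefixOf]
  aesop

lemma pvSp_wub (r : List Char) : pvSp ('W' :: 'U' :: 'B' :: r) = [] :: pvSp r := by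
  rw [pvSp]
  simp [pvWub, List.isPrefixOf]

lemma pvSp_cons_of_ne (c : Char) (r : List Char)
    (h : ∀ t, c :: r ≠ 'W' :: 'U' :: 'B' :: t) :
    pvSp (c :: r) = (pvSp r).modifyHead (c :: ·) := by
  rw [pvSp]
  rw [if_neg]
  intro hp
  obtain ⟨t, ht⟩ := (pvWub_prefix_iff _).mp hp
  exact h t ht

lemma pvSp_ne_nil (l : List Char) : pvSp l ≠ [] := by
  induction l using pvSp.induct with
  | case1 => simp [pvSp]
  | case2 c r hp ih =>
    rw [pvSp, if_pos hp]
    simp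
  | case3 c r hp ih =>
    rw [pvSp, if_neg hp]
    cases h : pvSp r with
    | nil => exact absurd h ih
    | cons a t => simp

-- splitOn's fuelled worker computes pvSp
lemma pvGo_spec (fuel : Nat) : ∀ (l cur : List Char) (acc : List (List Char)),
    l.length ≤ fuel →
    PySem.Chars.splitOn.go pvWub fuel l cur acc
      = acc.reverse ++ (pvSp l).modifyHead (cur.reverse ++ ·) := by
  induction fuel with
  | zero =>
    intro l cur acc hl
    have : l = [] := by cases l <;> simp_all
    subst this
    simp [PySem.Chars.splitOn.go, pvSp]
  | succ fuel ih =>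
    intro l cur acc hl
    cases l with
    | nil => simp [PySem.Chars.splitOn.go, pvSp]
    | cons c rest =>
      rw [PySem.Chars.splitOn.go]
      by_cases hp : pvWub.isPrefixOf (c :: rest) = true
      · rw [if_pos hp]
        have hlen : ((c :: rest).drop pvWub.length).length ≤ fuel := by
          simp [pvWub] at hl ⊢; omega
        rw [ih _ _ _ hlen]
        rw [pvSp, if_pos hp]
        have hd : (c :: rest).drop pvWub.length = (c :: rest).drop 3 := by
          simp [pvWub]
        rw [hd]
        cases hsp : pvSp ((c :: rest).drop 3) with
        | nil => exact absurd hsp (pvSp_ne_nil _)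
        | cons a t' => simp
      · rw [if_neg hp]
        have hlen : rest.length ≤ fuel := by simp at hl; omega
        rw [ih _ _ _ hlen]
        rw [pvSp, if_neg hp]
        cases hsp : pvSp rest with
        | nil => exact absurd hsp (pvSp_ne_nil _)
        | cons a t' => simp

lemma pvSplitOn_eq (l : List Char) : PySem.Chars.splitOn l pvWub = pvSp l := by
  have h := pvGo_spec (l.length + 1) l [] [] (by omega)
  rw [PySem.Chars.splitOn]
  rw [h]
  cases hsp : pvSp l with
  | nil => exact absurd hsp (pvSp_ne_nil _)
  | cons a t => simp

-- the joined nonempty parts, and the single leading space A emits before them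
def pvJ (l : List Char) : List Char :=
  PySem.Chars.join [' '] ((pvSp l).filter (fun p => p ≠ []))

def pvLead (l : List Char) : List Char :=
  if pvWub.isPrefixOf l = true ∧ pvJ l ≠ [] then [' '] else []

lemma pvLead_spaces (l : List Char) : ∀ c ∈ pvLead l, c = ' ' := by
  unfold pvLead; split <;> simp

lemma pvJ_wub_cons (r : List Char) : pvJ ('W' :: 'U' :: 'B' :: r) = pvJ r := by
  simp [pvJ, pvSp_wub]

lemma pvJ_wub_nil : pvJ pvWub = [] := by
  have : pvWub = 'W' :: 'U' :: 'B' :: ([] : List Char) := rfl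
  rw [this, pvJ_wub_cons]
  simp [pvJ, pvSp, PySem.Chars.join_nil]

-- equation lemmas for the two loops
lemma pvInnerA_fix (l : List Char) (h : ∀ (c : Char) (r : List Char), l = 'W' :: 'U' :: 'B' :: c :: r → False) :
    pvInnerA l = l := by
  rw [pvInnerA.eq_def]
  split
  next c r => exact absurd rfl (h c r)
  next => rfl

lemma pvLoopA_wub (r : List Char) : pvLoopA ('W' :: 'U' :: 'B' :: r) = ' ' :: pvLoopA (pvInnerA r) := by
  rw [pvLoopA]

lemma pvLoopA_nil : pvLoopA [] = [] := by
  rw [pvLoopA.eq_def]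

lemma pvLoopA_cons (c : Char) (r : List Char) (h : ∀ t, c :: r ≠ 'W' :: 'U' :: 'B' :: t) :
    pvLoopA (c :: r) = c :: pvLoopA r := by
  have h' : ∀ (l : List Char), l = c :: r → pvLoopA l = c :: pvLoopA r := by
    intro l hl
    rw [pvLoopA.eq_def]
    split
    · rename_i r'
      exact absurd hl.symm (h r')
    · rename_i c' r' hx
      injection hl with h1 h2
      rw [h1, h2]
    · exact absurd hl.symm (by simp)
  exact h' _ rfl

lemma pvInnerA_J (l : List Char) : pvJ (pvInnerA l) = pvJ l := by
  induction l using pvInnerA.induct with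
  | case1 c r ih => rw [pvInnerA]; rw [ih, pvJ_wub_cons]
  | case2 l h => rw [pvInnerA_fix l h]

lemma pvInnerA_prefix (l : List Char) (h : pvWub.isPrefixOf (pvInnerA l) = true) :
    pvInnerA l = pvWub := by
  induction l using pvInnerA.induct with
  | case1 c r ih => rw [pvInnerA] at h ⊢; exact ih h
  | case2 l hno =>
    rw [pvInnerA_fix l hno] at h ⊢
    obtain ⟨t, ht⟩ := (pvWub_prefix_iff _).mp h
    subst ht
    cases t with
    | nil => rfl
    | cons a t' => exact absurd rfl (hno a t')

lemma pvJoin_cons (c : Char) (h : List Char) (F : List (List Char)) :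
    PySem.Chars.join [' '] ((c :: h) :: F) = c :: PySem.Chars.join [' '] (h :: F) := by
  cases F with
  | nil => rw [PySem.Chars.join_singleton, PySem.Chars.join_singleton]
  | cons g gs => rw [PySem.Chars.join_cons_cons, PySem.Chars.join_cons_cons]; simp

lemma pvJ_head_ne_nil (f : List Char) (fs : List (List Char)) (hf : f ≠ []) :
    PySem.Chars.join [' '] (f :: fs) ≠ [] := by
  cases fs with
  | nil => rw [PySem.Chars.join_singleton]; exact hf
  | cons g gs =>
    rw [PySem.Chars.join_cons_cons]
    cases f with
    | nil => exact absurd rfl hf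
    | cons a t => simp

-- head of pvSp is empty only for the empty string or a string starting with 'WUB'
lemma pvSp_head_nil (r : List Char) (t : List (List Char)) (hsp : pvSp r = [] :: t) :
    r = [] ∨ pvWub.isPrefixOf r = true := by
  cases r with
  | nil => exact Or.inl rfl
  | cons c' r' =>
    by_cases hp : pvWub.isPrefixOf (c' :: r') = true
    · exact Or.inr hp
    · exfalso
      rw [pvSp, if_neg hp] at hsp
      cases hsp2 : pvSp r' with
      | nil => exact pvSp_ne_nil _ hsp2
      | cons a t2 =>
        rw [hsp2] at hsp
        simp [List.modifyHead] at hsp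

-- main decomposition: A's raw loop output is pvLead ++ pvJ ++ trailing spaces
lemma pvLoopA_decomp (l : List Char) :
    ∃ b, (∀ c ∈ b, c = ' ') ∧ pvLoopA l = pvLead l ++ pvJ l ++ b := by
  induction l using pvLoopA.induct with
  | case1 r ih =>
    obtain ⟨b, hb, hEq⟩ := ih
    have hJi := pvInnerA_J r
    by_cases hJ : pvJ r = []
    · have hleadI : pvLead (pvInnerA r) = [] := by
        unfold pvLead; rw [if_neg]; rintro ⟨-, hne⟩; exact hne (hJi.trans hJ)
      refine ⟨' ' :: b, ?_, ?_⟩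
      · intro c hc
        rcases List.mem_cons.mp hc with rfl | hc
        · rfl
        · exact hb _ hc
      · rw [pvLoopA_wub, hEq, hleadI, hJi, hJ]
        have : pvLead ('W' :: 'U' :: 'B' :: r) = [] := by
          unfold pvLead; rw [if_neg]; rintro ⟨-, hne⟩; exact hne (by rw [pvJ_wub_cons]; exact hJ)
        rw [this, pvJ_wub_cons, hJ]
        simp
    · have hleadI : pvLead (pvInnerA r) = [] := by
        unfold pvLead; rw [if_neg]; rintro ⟨hp, -⟩
        exact hJ (by rw [← hJi, pvInnerA_prefix r hp, pvJ_wub_nil])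
      refine ⟨b, hb, ?_⟩
      rw [pvLoopA_wub, hEq, hleadI, hJi]
      have hleadL : pvLead ('W' :: 'U' :: 'B' :: r) = [' '] := by
        unfold pvLead
        rw [if_pos]
        exact ⟨by simp [pvWub, List.isPrefixOf], by rw [pvJ_wub_cons]; exact hJ⟩
      rw [hleadL, pvJ_wub_cons]
      simp
  | case2 c r hno ih =>
    have hno' : ∀ t, c :: r ≠ 'W' :: 'U' :: 'B' :: t := by
      intro t ht
      injection ht with h1 h2
      exact hno t h1 h2
    have hleadL : pvLead (c :: r) = [] := by
      unfold pvLead; rw [if_neg]; rintro ⟨hp, -⟩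
      obtain ⟨t, ht⟩ := (pvWub_prefix_iff _).mp hp
      exact hno' t ht
    obtain ⟨b, hb, hEq⟩ := ih
    cases hsp : pvSp r with
    | nil => exact absurd hsp (pvSp_ne_nil _)
    | cons h t =>
      have hspc : pvSp (c :: r) = (c :: h) :: t := by
        rw [pvSp_cons_of_ne c r hno', hsp]; rfl
      have hJl : pvJ (c :: r) = PySem.Chars.join [' '] ((c :: h) :: t.filter (fun p => p ≠ [])) := by
        simp [pvJ, hspc]
      by_cases hh : h = []
      · subst hh
        rcases pvSp_head_nil r t hsp with hrnil | hp
        · subst hrnil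
          have : t = [] := by simpa [pvSp] using hsp
          subst this
          refine ⟨[], by simp, ?_⟩
          rw [pvLoopA_cons c [] hno', hleadL, hJl]
          simp [pvLoopA, PySem.Chars.join_singleton]
        · have hJr : pvJ r = PySem.Chars.join [' '] (t.filter (fun p => p ≠ [])) := by
            simp [pvJ, hsp]
          have hleadr : pvLead r = if pvJ r ≠ [] then [' '] else [] := by
            unfold pvLead
            by_cases hJrn : pvJ r = [] <;> simp [hp, hJrn]
          by_cases hJrn : pvJ r = []
          · have hF : t.filter (fun p => p ≠ []) = [] := by
              cases hF : t.filter (fun p => p ≠ []) with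
              | nil => rfl
              | cons f fs =>
                exfalso
                have hfne : f ≠ [] := by
                  have : f ∈ t.filter (fun p => p ≠ []) := by rw [hF]; simp
                  simpa using (List.of_mem_filter this)
                exact pvJ_head_ne_nil f fs hfne (by rw [← hF, ← hJr]; exact hJrn)
            refine ⟨b, hb, ?_⟩
            rw [pvLoopA_cons c r hno', hEq, hleadL, hJl, hF, hleadr, if_neg (by simpa using hJrn), hJrn]
            simp [PySem.Chars.join_singleton]
          · refine ⟨b, hb, ?_⟩
            rw [pvLoopA_cons c r hno', hEq, hleadr, if_pos hJrn, hleadL, hJl]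
            cases hF : t.filter (fun p => p ≠ []) with
            | nil => exact absurd (by rw [hJr, hF, PySem.Chars.join_nil]) hJrn
            | cons f fs =>
              rw [PySem.Chars.join_cons_cons]
              rw [hJr, hF]
              simp
      · have hpr : pvWub.isPrefixOf r ≠ true := by
          intro hp
          obtain ⟨t', ht'⟩ := (pvWub_prefix_iff _).mp hp
          rw [ht', pvSp_wub] at hsp
          injection hsp with h1 h2
          exact hh h1.symm
        have hleadr : pvLead r = [] := by
          unfold pvLead; rw [if_neg]; rintro ⟨hp, -⟩; exact hpr hp
        have hJr : pvJ r = PySem.Chars.join [' '] (h :: t.filter (fun p => p ≠ [])) := by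
          simp [pvJ, hsp, hh]
        refine ⟨b, hb, ?_⟩
        rw [pvLoopA_cons c r hno', hEq, hleadr, hleadL, hJl, pvJoin_cons, hJr]
        simp
  | case3 =>
    refine ⟨[], by simp, ?_⟩
    rw [pvLoopA_nil]
    simp [pvLead, pvJ, pvSp, PySem.Chars.join_nil]

-- strip ignores all-space padding on either side
lemma pvIsspace_space : PySem.Chars.isspace ' ' = true := by decide

lemma pvDropWhile_spaces (a : List Char) (ha : ∀ c ∈ a, c = ' ') :
    List.dropWhile PySem.Chars.isspace a = [] := by
  rw [List.dropWhile_eq_nil_iff]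
  intro x hx
  rw [ha x hx]
  exact pvIsspace_space

lemma pvRstrip_append_spaces (x b : List Char) (hb : ∀ c ∈ b, c = ' ') :
    PySem.Chars.rstrip (x ++ b) = PySem.Chars.rstrip x := by
  unfold PySem.Chars.rstrip
  rw [List.reverse_append, List.dropWhile_append,
      pvDropWhile_spaces b.reverse (by intro c hc; exact hb c (List.mem_reverse.mp hc))]
  simp

lemma pvStrip_spaces (a x b : List Char) (ha : ∀ c ∈ a, c = ' ') (hb : ∀ c ∈ b, c = ' ') :
    PySem.Chars.strip (a ++ x ++ b) = PySem.Chars.strip x := by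
  unfold PySem.Chars.strip PySem.Chars.lstrip
  rw [List.append_assoc, List.dropWhile_append, pvDropWhile_spaces a ha]
  simp only [List.isEmpty_nil, if_true]
  rw [List.dropWhile_append]
  by_cases hx : (List.dropWhile PySem.Chars.isspace x).isEmpty = true
  · rw [if_pos hx, pvDropWhile_spaces b hb]
    rw [List.isEmpty_iff.mp hx]
  · rw [if_neg hx]
    exact pvRstrip_append_spaces _ b hb

lemma pvRstrip_strip (x : List Char) :
    PySem.Chars.rstrip (PySem.Chars.strip x) = PySem.Chars.strip x := by
  unfold PySem.Chars.strip PySem.Chars.rstrip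
  rw [List.reverse_reverse, List.dropWhile_idempotent]

-- ===== VERDICT (by name: the statement is the Claim_ definition above) =====
theorem song_decoder_spec : Claim_equal_song_decoder := by
  intro s _
  unfold Spec_song_decoder song_decoder song_decoder_alt
  obtain ⟨b, hb, hEq⟩ := pvLoopA_decomp s.toList
  rw [hEq, pvRstrip_strip, pvStrip_spaces _ _ _ (pvLead_spaces s.toList) hb]
  have : (['W', 'U', 'B'] : List Char) = pvWub := rfl
  rw [this, pvSplitOn_eq]
  rfl
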